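-- pv_equiv track=rewrite | github.com/NguyenTanPtit/Python-code-PTIT | thuchanh/so_nguyen_to_chan.py | check
-- ===== SOURCE A (Python) =====
-- def check(n):
--     s = str(n)
--     s1 = s[::-1]
--     if s1 != s or len(s) % 2 != 0:
--         return False
--     for i in s:
--         if int(i) % 2 != 0:
--             return False
--     return True
-- ===== SOURCE B (Python) =====
-- def check(n):
--     s = str(n)
--     L = len(s)
--     if L % 2 != 0:
--         return False
--     for i in range(L // 2):
--         if s[i] != s[L - 1 - i]:
--             return False
--         if int(s[i]) % 2 != 0:
--             return False
--     return True
-- ===== Notes on version B (the rewrite author's own statement) =====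
-- stated objective: alternative
-- what changed: Replaces the full-string reversal plus a separate all-digits pass with a single two-pointer scan over the first half, checking the mirror equality and digit parity together (parity of the first half suffices for an even-length palindrome).
import Mathlib
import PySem

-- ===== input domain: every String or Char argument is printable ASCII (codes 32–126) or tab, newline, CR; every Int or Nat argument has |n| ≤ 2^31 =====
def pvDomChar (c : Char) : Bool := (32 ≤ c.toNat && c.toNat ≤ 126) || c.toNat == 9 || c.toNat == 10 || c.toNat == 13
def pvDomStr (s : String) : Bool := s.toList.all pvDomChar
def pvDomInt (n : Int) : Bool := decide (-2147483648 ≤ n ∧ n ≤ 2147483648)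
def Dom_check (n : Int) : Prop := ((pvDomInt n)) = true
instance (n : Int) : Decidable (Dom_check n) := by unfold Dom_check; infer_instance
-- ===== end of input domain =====

-- B replaces the reversal + separate all-digits pass of A with one two-pointer scan over
-- the first half (mirror equality and digit parity checked together); alternative, not faster.

-- ===== PORT A =====
-- int(i) for a one-character string i; the default 0 is never read on reachable inputs:
-- the loop runs only when str(n) is a palindrome, hence contains no '-' and is all digits.
def pvDigitVal (c : Char) : Int := (PySem.Int.ofStr? (String.ofList [c])).getD 0

-- 'for i in s: if int(i) % 2 != 0: return False' then 'return True'
def checkLoop : List Char → Bool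
  | [] => true
  | c :: rest => if pvDigitVal c % 2 ≠ 0 then false else checkLoop rest

def check (n : Int) : Bool :=
  let s := PySem.Int.toChars n                                  -- s = str(n)
  let s1 := (PySem.List.slice? s none none (-1)).getD []        -- s1 = s[::-1] (step ≠ 0, always some)
  if s1 ≠ s ∨ s.length % 2 ≠ 0 then false
  else checkLoop s

-- ===== PORT B =====
-- 'for i in range(L // 2): …' as a recursion on the number k of remaining iterations;
-- all indices accessed are < L, so the getD default ' ' is never read.
def checkAltLoop (s : List Char) (L : Nat) : Nat → Nat → Bool
  | _, 0 => true
  | i, k+1 =>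
    if s.getD i ' ' ≠ s.getD (L - 1 - i) ' ' then false
    else if pvDigitVal (s.getD i ' ') % 2 ≠ 0 then false
    else checkAltLoop s L (i+1) k

def check_alt (n : Int) : Bool :=
  let s := PySem.Int.toChars n                                  -- s = str(n)
  let L := s.length
  if L % 2 ≠ 0 then false
  else checkAltLoop s L 0 (L / 2)

-- ===== PRECONDITION & SPEC =====
def Spec_check (n : Int) (out : Bool) : Prop := out = check_alt n
instance (n : Int) (out : Bool) : Decidable (Spec_check n out) := by unfold Spec_check; infer_instance

-- ===== CLAIM (what is proved, stated in full; the proofs are below) =====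
def Claim_equal_check : Prop := ∀ (n : Int), Dom_check n → Spec_check n (check n)

-- ===== LEMMAS AND PROOFS =====

theorem checkLoop_iff (s : List Char) :
    checkLoop s = true ↔ ∀ c ∈ s, pvDigitVal c % 2 = 0 := by
  induction s with
  | nil =>
    constructor
    · intro _ c hc; exact absurd hc (List.not_mem_nil)
    · intro _; rfl
  | cons c rest ih =>
    unfold checkLoop
    by_cases h : pvDigitVal c % 2 ≠ 0
    · rw [if_pos h]
      constructor
      · intro hf; exact absurd hf (by simp)
      · intro hall; exact absurd (hall c (List.mem_cons_self)) h
    · rw [if_neg h, ih]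
      push_neg at h
      constructor
      · intro hall c' hc'
        rcases List.mem_cons.mp hc' with rfl | hm
        · exact h
        · exact hall c' hm
      · intro hall c' hc'; exact hall c' (List.mem_cons_of_mem _ hc')

theorem checkAltLoop_iff (s : List Char) (L : Nat) (k i : Nat) :
    checkAltLoop s L i k = true ↔
      ∀ j, i ≤ j → j < i + k →
        s.getD j ' ' = s.getD (L - 1 - j) ' ' ∧ pvDigitVal (s.getD j ' ') % 2 = 0 := by
  induction k generalizing i with
  | zero =>
    constructor
    · intro _ j h1 h2; omega
    · intro _; rfl
  | succ k ih =>
    constructor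
    · intro h j hij hjk
      unfold checkAltLoop at h
      by_cases h1 : s.getD i ' ' ≠ s.getD (L - 1 - i) ' '
      · rw [if_pos h1] at h; exact absurd h (by simp)
      · rw [if_neg h1] at h
        by_cases h2 : pvDigitVal (s.getD i ' ') % 2 ≠ 0
        · rw [if_pos h2] at h; exact absurd h (by simp)
        · rw [if_neg h2] at h
          push_neg at h1 h2
          rcases Nat.eq_or_lt_of_le hij with rfl | hlt
          · exact ⟨h1, h2⟩
          · exact (ih (i+1)).mp h j hlt (by omega)
    · intro h
      unfold checkAltLoop
      have hi := h i (le_refl i) (by omega)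
      rw [if_neg (not_not_intro hi.1), if_neg (not_not_intro hi.2)]
      exact (ih (i+1)).mpr (fun j hij hjk => h j (by omega) (by omega))

-- the crux: reversal + full-digit pass ≡ first-half two-pointer conditions, for even length
theorem halves_iff (s : List Char) (he : s.length % 2 = 0) :
    (s.reverse = s ∧ ∀ c ∈ s, pvDigitVal c % 2 = 0) ↔
      (∀ j, j < s.length / 2 →
        s.getD j ' ' = s.getD (s.length - 1 - j) ' ' ∧ pvDigitVal (s.getD j ' ') % 2 = 0) := by
  constructor
  · rintro ⟨hp, hd⟩ j hj
    have hjl : j < s.length := by omega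
    have hml : s.length - 1 - j < s.length := by omega
    have h1 : s.reverse[j]'(by simpa using hjl) = s[j]'hjl := by simp only [hp]
    have h2 : s.reverse[j]'(by simpa using hjl) = s[s.length - 1 - j]'hml := by
      rw [List.getElem_reverse]
    have hmirror : s[j]'hjl = s[s.length - 1 - j]'hml := h1.symm.trans h2
    constructor
    · rw [List.getD_eq_getElem s ' ' hjl, List.getD_eq_getElem s ' ' hml]
      exact hmirror
    · rw [List.getD_eq_getElem s ' ' hjl]
      exact hd _ (List.getElem_mem hjl)
  · intro h
    have key : ∀ i (hi : i < s.length),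
        s[s.length - 1 - i]'(by omega) = s[i]'hi ∧ pvDigitVal (s[i]'hi) % 2 = 0 := by
      intro i hi
      by_cases hc : i < s.length / 2
      · obtain ⟨h1, h2⟩ := h i hc
        rw [List.getD_eq_getElem s ' ' hi,
            List.getD_eq_getElem s ' ' (by omega : s.length - 1 - i < s.length)] at h1
        rw [List.getD_eq_getElem s ' ' hi] at h2
        exact ⟨h1.symm, h2⟩
      · have hj : s.length - 1 - i < s.length / 2 := by omega
        obtain ⟨h1, h2⟩ := h (s.length - 1 - i) hj
        have hji : s.length - 1 - (s.length - 1 - i) = i := by omega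
        rw [List.getD_eq_getElem s ' ' (by omega : s.length - 1 - i < s.length), hji,
            List.getD_eq_getElem s ' ' hi] at h1
        rw [List.getD_eq_getElem s ' ' (by omega : s.length - 1 - i < s.length)] at h2
        rw [h1] at h2
        exact ⟨h1, h2⟩
    constructor
    · apply List.ext_getElem (by simp)
      intro i hi1 hi2
      rw [List.getElem_reverse]
      exact (key i hi2).1
    · intro c hc
      obtain ⟨i, hi, rfl⟩ := List.mem_iff_getElem.mp hc
      exact (key i hi).2

theorem check_eq_alt (n : Int) : check n = check_alt n := by
  unfold check check_alt
  simp only [PySem.List.slice?_none_none_neg_one, Option.getD_some]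
  set s := PySem.Int.toChars n with hs
  by_cases hodd : s.length % 2 ≠ 0
  · simp [hodd]
  · push_neg at hodd
    simp only [hodd, ne_eq, not_true_eq_false, or_false, if_false]
    by_cases hpal : s.reverse = s
    · simp only [hpal, not_true_eq_false, if_false]
      rw [Bool.eq_iff_iff, checkLoop_iff,
          checkAltLoop_iff s s.length (s.length / 2) 0]
      constructor
      · intro h j _ hj
        exact (halves_iff s hodd).mp ⟨hpal, h⟩ j (by omega)
      · intro h
        exact ((halves_iff s hodd).mpr (fun j hj => h j (Nat.zero_le j) (by omega))).2
    · simp only [hpal, not_false_eq_true, if_true]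
      rw [Bool.false_eq, ← Bool.not_eq_true,
          checkAltLoop_iff s s.length (s.length / 2) 0]
      intro hB
      exact hpal ((halves_iff s hodd).mpr (fun j hj => hB j (Nat.zero_le j) (by omega))).1

-- ===== VERDICT (by name: the statement is the Claim_ definition above) =====
theorem check_spec : Claim_equal_check := by
  intro n _
  unfold Spec_check
  exact check_eq_alt n
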